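-- pv_equiv track=rewrite | github.com/Isthares/CIS118_FinalProject | PythonFinalProject.py | isPossibleConvert
-- ===== SOURCE A (Python) =====
-- def isPossibleConvert (op):
--     """ Check if the option entered can be converted to int """
--     found = 0
--     for i in range (0,101,1):
--         if (op == str(i)):
--             found = 1
--             break
--     if (found == 1):
--         return True
--     else:
--         return False
-- ===== SOURCE B (Python) =====
-- def isPossibleConvert(op):
--     """ Check if the option entered can be converted to int """
--     try:
--         n = int(op)
--     except (ValueError, TypeError):
--         return False
--     return 0 <= n <= 100 and str(n) == op
-- ===== Notes on version B (the rewrite author's own statement) =====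
-- stated objective: simpler
-- what changed: Replaces the 101-iteration scan comparing op against str(i) with a single int() parse guarded by a canonical-form check str(n) == op.
import Mathlib
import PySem

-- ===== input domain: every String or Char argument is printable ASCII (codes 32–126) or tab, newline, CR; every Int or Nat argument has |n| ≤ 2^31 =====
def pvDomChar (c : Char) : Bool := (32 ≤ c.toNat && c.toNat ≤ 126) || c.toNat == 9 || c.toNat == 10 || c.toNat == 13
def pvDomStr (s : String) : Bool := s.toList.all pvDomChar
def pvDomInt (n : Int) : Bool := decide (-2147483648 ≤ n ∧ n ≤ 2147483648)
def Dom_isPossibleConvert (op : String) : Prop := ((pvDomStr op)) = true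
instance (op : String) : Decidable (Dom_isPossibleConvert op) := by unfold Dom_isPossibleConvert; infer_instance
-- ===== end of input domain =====

-- B replaces A's 101-iteration scan over str(0..100) by one int() parse plus the
-- canonical-form check str(n) == op (objective: simpler).

-- ===== PORT A =====
-- the for-loop with break: returns found = 1 at the first i with op == str(i)
def pvLoopA (op : String) : List Int → Nat
  | [] => 0
  | i :: rest => if op == PySem.Int.toStr i then 1 else pvLoopA op rest

def isPossibleConvert (op : String) : Bool :=
  let found := pvLoopA op (PySem.List.pyRange 0 101 1)
  if found == 1 then true else false

-- ===== PORT B =====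
def isPossibleConvert_alt (op : String) : Bool :=
  match PySem.Int.ofStr? op with
  | none => false
  | some n => decide (0 ≤ n ∧ n ≤ 100) && (PySem.Int.toStr n == op)

-- ===== PRECONDITION & SPEC =====
def Spec_isPossibleConvert (op : String) (out : Bool) : Prop := out = isPossibleConvert_alt op
instance (op : String) (out : Bool) : Decidable (Spec_isPossibleConvert op out) := by unfold Spec_isPossibleConvert; infer_instance

-- ===== CLAIM (what is proved, stated in full; the proofs are below) =====
def Claim_equal_isPossibleConvert : Prop := ∀ (op : String), Dom_isPossibleConvert op → Spec_isPossibleConvert op (isPossibleConvert op)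

-- ===== LEMMAS AND PROOFS =====

lemma pvLoopA_eq_one_iff (op : String) (l : List Int) :
    pvLoopA op l = 1 ↔ ∃ i ∈ l, op = PySem.Int.toStr i := by
  induction l with
  | nil => simp [pvLoopA]
  | cons i rest ih =>
    simp only [pvLoopA]
    by_cases h : op == PySem.Int.toStr i
    · simp [beq_iff_eq.mp h]
    · have h' : op ≠ PySem.Int.toStr i := by simpa using h
      simp [h, ih, h']

-- B accepts every canonical string str(i), 0 ≤ i ≤ 100 (checked by evaluation)
lemma pvAlt_of_canonical :
    (PySem.List.pyRange 0 101 1).all (fun i => isPossibleConvert_alt (PySem.Int.toStr i)) = true := by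
  decide

lemma pvMem_range (n : Int) (h0 : 0 ≤ n) (h1 : n ≤ 100) : n ∈ PySem.List.pyRange 0 101 1 := by
  rw [PySem.List.mem_pyRange_one]; omega

-- ===== VERDICT (by name: the statement is the Claim_ definition above) =====
theorem isPossibleConvert_spec : Claim_equal_isPossibleConvert := by
  intro op _
  unfold Spec_isPossibleConvert
  by_cases hA : isPossibleConvert op = true
  · -- A true: op = str(i) for some i in range, so B accepts it too
    unfold isPossibleConvert at hA
    simp only [beq_iff_eq] at hA
    have h1 : pvLoopA op (PySem.List.pyRange 0 101 1) = 1 := by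
      by_contra h; simp [h] at hA
    obtain ⟨i, hi, rfl⟩ := (pvLoopA_eq_one_iff op _).mp h1
    have := List.all_eq_true.mp pvAlt_of_canonical i hi
    simp only [this]
    unfold isPossibleConvert
    simp [h1]
  · -- A false: B must be false too; otherwise op = str(n), 0 ≤ n ≤ 100, and A would find it
    rw [Bool.not_eq_true] at hA
    rw [hA]
    by_contra hB
    have hB' : isPossibleConvert_alt op = true := by
      cases h : isPossibleConvert_alt op
      · exact absurd h.symm hB
      · rfl
    unfold isPossibleConvert_alt at hB'
    cases hofs : PySem.Int.ofStr? op with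
    | none => rw [hofs] at hB'; simp at hB'
    | some n =>
      rw [hofs] at hB'
      simp only [Bool.and_eq_true, decide_eq_true_eq, beq_iff_eq] at hB'
      obtain ⟨⟨h0, h1⟩, heq⟩ := hB'
      have hmem : n ∈ PySem.List.pyRange 0 101 1 := pvMem_range n h0 h1
      have hloop : pvLoopA op (PySem.List.pyRange 0 101 1) = 1 :=
        (pvLoopA_eq_one_iff op _).mpr ⟨n, hmem, heq.symm⟩
      unfold isPossibleConvert at hA
      simp [hloop] at hA
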